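-- pv_equiv track=rewrite | github.com/muelitas/keywordRec | run_14/utils.py | IPA2customchars
-- ===== SOURCE A (Python) =====
-- def IPA2customchars(text, ipa2char):
--     '''Convert IPA phonemes in {text} to custom characters using the mapping
--     in {ipa2char}. Used for inferences.'''
--     words = text.split(' ')
--     new_words = []
--     for word in words:
--         new_word = []
--         ipa_phones = word.split('_')
--         for ph in ipa_phones:
--             new_word.append(ipa2char[ph])
--
--         new_words.append('_'.join(new_word))
--
--     text = ' '.join(new_words)
--     return text
-- ===== SOURCE B (Python) =====
-- import re
--
-- def IPA2customchars(text, ipa2char):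
--     '''Convert IPA phonemes in {text} to custom characters using the mapping
--     in {ipa2char}. Used for inferences.'''
--     out = []
--     is_sep = False
--     for piece in re.split(r'([ _])', text):
--         out.append(piece if is_sep else ipa2char[piece])
--         is_sep = not is_sep
--     return ''.join(out)
-- ===== Notes on version B (the rewrite author's own statement) =====
-- stated objective: alternative
-- what changed: Replaces the nested word/phoneme split-map-join loops by one flattened regex split that keeps the ' '/'_' separators inline, then a single pass that maps tokens through the dict and emits separators unchanged, joined once.
import Mathlib
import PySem

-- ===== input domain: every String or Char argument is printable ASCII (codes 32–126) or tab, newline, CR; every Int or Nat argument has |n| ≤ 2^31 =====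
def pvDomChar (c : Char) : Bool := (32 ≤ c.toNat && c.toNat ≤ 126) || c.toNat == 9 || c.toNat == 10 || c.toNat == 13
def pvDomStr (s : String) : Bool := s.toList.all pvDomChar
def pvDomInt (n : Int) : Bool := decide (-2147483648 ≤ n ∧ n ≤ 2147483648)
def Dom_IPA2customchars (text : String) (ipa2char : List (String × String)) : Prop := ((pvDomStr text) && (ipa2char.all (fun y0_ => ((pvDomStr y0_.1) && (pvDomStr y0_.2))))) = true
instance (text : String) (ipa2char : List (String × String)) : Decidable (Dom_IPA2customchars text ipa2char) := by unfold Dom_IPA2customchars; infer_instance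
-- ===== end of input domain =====

-- B flattens the nested word/phoneme loops into one separator-preserving split plus a single
-- alternating pass; equivalence of the two decompositions is proved on inputs whose tokens
-- are all keys of the mapping (elsewhere the Python raises KeyError).


-- the Python dict, with String keys/values read as their character lists
def pvDictC (ipa2char : List (String × String)) : PySem.Dict (List Char) (List Char) :=
  PySem.Dict.ofList (ipa2char.map (fun kv => (kv.1.toList, kv.2.toList)))

-- ===== PORT A =====
-- total form of ipa2char[ph]: exact under Pre_ (every token is a key; a missing key is a KeyError)
def IPA2customchars (text : String) (ipa2char : List (String × String)) : String :=
  let d := pvDictC ipa2char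
  let words := PySem.Chars.splitOn text.toList [' ']
  let newWords := words.map (fun word =>
    let ipaPhones := PySem.Chars.splitOn word ['_']
    PySem.Chars.join ['_'] (ipaPhones.map (fun ph => d.getD ph [])))
  String.ofList (PySem.Chars.join [' '] newWords)

-- ===== PORT B =====
-- hand-port of re.split(r'([ _])', text): tokens at even positions, the captured
-- one-char separators interleaved (exact for this pattern, empty tokens kept)
def pvResplit : List Char → List (List Char)
  | [] => [[]]
  | x :: xs =>
    if x = ' ' ∨ x = '_' then [] :: [x] :: pvResplit xs
    else (pvResplit xs).modifyHead (x :: ·)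

-- the single pass: is_sep alternates; tokens go through the dict, separators pass unchanged
def pvRender (d : PySem.Dict (List Char) (List Char)) : List (List Char) → Bool → List (List Char)
  | [], _ => []
  | p :: ps, isSep => (if isSep then p else d.getD p []) :: pvRender d ps (!isSep)

def IPA2customchars_alt (text : String) (ipa2char : List (String × String)) : String :=
  let d := pvDictC ipa2char
  String.ofList (PySem.Chars.join [] (pvRender d (pvResplit text.toList) false))

-- ===== PRECONDITION & SPEC =====
-- Pre_ excludes exactly the inputs where some '_'/' '-delimited token of text is not a key of
-- ipa2char: there Python A (and B) raise KeyError and return nothing.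
def Pre_IPA2customchars (text : String) (ipa2char : List (String × String)) : Prop :=
  ∀ w ∈ PySem.Chars.splitOn text.toList [' '], ∀ p ∈ PySem.Chars.splitOn w ['_'],
    p ∈ ipa2char.map (fun kv => kv.1.toList)
instance (text : String) (ipa2char : List (String × String)) : Decidable (Pre_IPA2customchars text ipa2char) := by unfold Pre_IPA2customchars; infer_instance

def pvWitness_IPA2customchars : String × (List (String × String)) :=
  ("a_b c", [("a", "1"), ("b", "2"), ("c", "3")])

def Spec_IPA2customchars (text : String) (ipa2char : List (String × String)) (out : String) : Prop := out = IPA2customchars_alt text ipa2char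
instance (text : String) (ipa2char : List (String × String)) (out : String) : Decidable (Spec_IPA2customchars text ipa2char out) := by unfold Spec_IPA2customchars; infer_instance

-- ===== CLAIM (what is proved, stated in full; the proofs are below) =====
def Claim_equal_IPA2customchars : Prop := ∀ (text : String) (ipa2char : List (String × String)), Dom_IPA2customchars text ipa2char → Pre_IPA2customchars text ipa2char → Spec_IPA2customchars text ipa2char (IPA2customchars text ipa2char)

-- ===== LEMMAS AND PROOFS =====

-- a simple structural single-char splitter, the common reference both ports reduce to
def splitC (c : Char) : List Char → List (List Char)
  | [] => [[]]
  | x :: xs => if x = c then [] :: splitC c xs else (splitC c xs).modifyHead (x :: ·)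

theorem splitC_ne_nil (c : Char) (l : List Char) : splitC c l ≠ [] := by
  induction l with
  | nil => simp [splitC]
  | cons x xs ih =>
    simp only [splitC]
    split_ifs
    · simp
    · cases h : splitC c xs with
      | nil => exact absurd h ih
      | cons w ws => simp

theorem modifyHead_id {α : Type} (l : List α) :
    l.modifyHead (fun x => x) = l := by
  cases l <;> simp

theorem modifyHead_id' {α : Type} (l : List (List α)) :
    l.modifyHead (fun x => [] ++ x) = l := by
  cases l <;> simp

theorem splitOn_go_spec (c : Char) (fuel : Nat) :
    ∀ (l cur : List Char) (acc : List (List Char)), l.length < fuel →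
      PySem.Chars.splitOn.go [c] fuel l cur acc
        = acc.reverse ++ (splitC c l).modifyHead (cur.reverse ++ ·) := by
  induction fuel with
  | zero => intro l cur acc h; omega
  | succ n ih =>
    intro l cur acc h
    cases l with
    | nil => simp [PySem.Chars.splitOn.go, splitC]
    | cons x xs =>
      by_cases hx : x = c
      · subst hx
        have hpre : [x].isPrefixOf (x :: xs) = true := by simp [List.isPrefixOf]
        simp only [PySem.Chars.splitOn.go, hpre, if_pos]
        have : xs.length < n := by simpa using Nat.lt_of_succ_lt_succ h
        rw [ih _ _ _ (by simpa using this)]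
        simp [splitC, modifyHead_id]
      · have hpre : [c].isPrefixOf (x :: xs) = false := by
          simp [List.isPrefixOf]
          intro hc; exact absurd hc.symm hx
        simp only [PySem.Chars.splitOn.go, hpre]
        have : xs.length < n := by simpa using Nat.lt_of_succ_lt_succ h
        rw [ih _ _ _ this]
        obtain ⟨w, ws, hw⟩ := List.exists_cons_of_ne_nil (splitC_ne_nil c xs)
        simp [splitC, hx, hw]

theorem splitOn_eq_splitC (c : Char) (l : List Char) :
    PySem.Chars.splitOn l [c] = splitC c l := by
  unfold PySem.Chars.splitOn
  rw [splitOn_go_spec c (l.length + 1) l [] [] (by omega)]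
  simp [modifyHead_id]

theorem join_nil_eq_flatten (ps : List (List Char)) :
    PySem.Chars.join [] ps = ps.flatten := by
  induction ps with
  | nil => simp [PySem.Chars.join_nil]
  | cons a t ih =>
    cases t with
    | nil => simp [PySem.Chars.join_singleton]
    | cons b u => rw [PySem.Chars.join_cons_cons]; simp [ih]

theorem join_append_head (sep A B : List Char) (t : List (List Char)) :
    PySem.Chars.join sep ((A ++ B) :: t) = A ++ PySem.Chars.join sep (B :: t) := by
  cases t with
  | nil => simp [PySem.Chars.join_singleton]
  | cons b u => rw [PySem.Chars.join_cons_cons, PySem.Chars.join_cons_cons]; simp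

theorem splitC_no_sep (c : Char) (p : List Char) (hp : ∀ x ∈ p, x ≠ c) :
    splitC c p = [p] := by
  induction p with
  | nil => simp [splitC]
  | cons x xs ih =>
    have hx : x ≠ c := hp x (by simp)
    rw [splitC, if_neg hx, ih (fun y hy => hp y (by simp [hy]))]
    simp

theorem splitC_prefix (c : Char) (p l : List Char) (hp : ∀ x ∈ p, x ≠ c) :
    splitC c (p ++ l) = (splitC c l).modifyHead (p ++ ·) := by
  induction p with
  | nil => simp [modifyHead_id]
  | cons x xs ih =>
    have hx : x ≠ c := hp x (by simp)
    rw [List.cons_append, splitC, if_neg hx, ih (fun y hy => hp y (by simp [hy]))]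
    obtain ⟨w, ws, hw⟩ := List.exists_cons_of_ne_nil (splitC_ne_nil c l)
    simp [hw]

-- the A-side value of one word
def pvW (d : PySem.Dict (List Char) (List Char)) (w : List Char) : List Char :=
  PySem.Chars.join ['_'] ((splitC '_' w).map (fun ph => d.getD ph []))

theorem pvW_no_sep (d : PySem.Dict (List Char) (List Char)) (p : List Char)
    (hp : ∀ x ∈ p, x ≠ '_') : pvW d p = d.getD p [] := by
  rw [pvW, splitC_no_sep _ _ hp]
  simp [PySem.Chars.join_singleton]

theorem pvW_prefix_us (d : PySem.Dict (List Char) (List Char)) (p w : List Char)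
    (hp : ∀ x ∈ p, x ≠ '_') :
    pvW d (p ++ '_' :: w) = d.getD p [] ++ '_' :: pvW d w := by
  rw [pvW, splitC_prefix _ _ _ hp]
  have : splitC '_' ('_' :: w) = [] :: splitC '_' w := by rw [splitC, if_pos rfl]
  rw [this]
  obtain ⟨q, qs, hq⟩ := List.exists_cons_of_ne_nil (splitC_ne_nil '_' w)
  rw [hq]
  simp only [List.modifyHead_cons, List.map_cons]
  rw [PySem.Chars.join_cons_cons, pvW, hq, List.map_cons]
  simp

theorem pvResplit_ne_nil (l : List Char) : pvResplit l ≠ [] := by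
  induction l with
  | nil => simp [pvResplit]
  | cons x xs ih =>
    simp only [pvResplit]
    split_ifs
    · simp
    · cases h : pvResplit xs with
      | nil => exact absurd h ih
      | cons w ws => simp

theorem main_lemma (d : PySem.Dict (List Char) (List Char)) (cs : List Char) :
    ∀ p : List Char, (∀ x ∈ p, x ≠ ' ' ∧ x ≠ '_') →
      (pvRender d ((pvResplit cs).modifyHead (p ++ ·)) false).flatten
        = PySem.Chars.join [' ']
            (((splitC ' ' cs).modifyHead (p ++ ·)).map (pvW d)) := by
  induction cs with
  | nil =>
    intro p hp
    simp only [pvResplit, splitC, List.modifyHead_cons, List.append_nil, pvRender,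
      List.flatten, List.map_cons, List.map_nil, PySem.Chars.join_singleton]
    rw [pvW_no_sep d p (fun x hx => (hp x hx).2)]
    simp
  | cons x xs ih =>
    intro p hp
    obtain ⟨w, ws, hw⟩ := List.exists_cons_of_ne_nil (splitC_ne_nil ' ' xs)
    have hA := ih [] (by simp)
    rw [modifyHead_id', modifyHead_id', hw] at hA
    by_cases hsp : x = ' '
    · subst hsp
      have e1 : pvResplit (' ' :: xs) = [] :: [' '] :: pvResplit xs := by
        simp [pvResplit]
      have e2 : splitC ' ' (' ' :: xs) = [] :: splitC ' ' xs := by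
        simp [splitC]
      rw [e1, e2, List.modifyHead_cons, List.modifyHead_cons, hw, List.append_nil]
      simp only [pvRender, Bool.not_false, Bool.not_true, if_true,
        List.flatten_cons, List.map_cons]
      rw [PySem.Chars.join_cons_cons, pvW_no_sep d p (fun x hx => (hp x hx).2), hA]
      simp
    · by_cases hus : x = '_'
      · subst hus
        have e1 : pvResplit ('_' :: xs) = [] :: ['_'] :: pvResplit xs := by
          simp [pvResplit]
        have e2 : splitC ' ' ('_' :: xs) = (splitC ' ' xs).modifyHead ('_' :: ·) := by
          simp [splitC]
        rw [e1, List.modifyHead_cons, e2, hw, List.modifyHead_cons,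
          List.modifyHead_cons, List.append_nil]
        simp only [pvRender, Bool.not_false, Bool.not_true, if_true,
          List.flatten_cons, List.map_cons]
        rw [pvW_prefix_us d p w (fun x hx => (hp x hx).2)]
        rw [join_append_head [' '] (PySem.Dict.getD d p []) ('_' :: pvW d w),
          show ('_' : Char) :: pvW d w = ['_'] ++ pvW d w from rfl,
          join_append_head [' '] ['_'] (pvW d w), hA]
        simp
      · obtain ⟨r, rs, hr⟩ := List.exists_cons_of_ne_nil (pvResplit_ne_nil xs)
        have e1 : pvResplit (x :: xs) = (pvResplit xs).modifyHead (x :: ·) := by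
          simp [pvResplit, hsp, hus]
        have e2 : splitC ' ' (x :: xs) = (splitC ' ' xs).modifyHead (x :: ·) := by
          simp [splitC, hsp]
        have hp' : ∀ y ∈ p ++ [x], y ≠ ' ' ∧ y ≠ '_' := by
          intro y hy
          rcases List.mem_append.mp hy with h | h
          · exact hp y h
          · simp at h; subst h; exact ⟨hsp, hus⟩
        have hI := ih (p ++ [x]) hp'
        rw [hr, hw, List.modifyHead_cons, List.modifyHead_cons] at hI
        rw [e1, e2, hr, hw, List.modifyHead_cons, List.modifyHead_cons,
          List.modifyHead_cons, List.modifyHead_cons]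
        simpa using hI

-- ===== VERDICT (by name: the statement is the Claim_ definition above) =====
theorem IPA2customchars_spec : Claim_equal_IPA2customchars := by
  unfold Claim_equal_IPA2customchars
  intro text ipa2char _ _
  unfold Spec_IPA2customchars IPA2customchars IPA2customchars_alt
  simp only [splitOn_eq_splitC]
  rw [join_nil_eq_flatten]
  have h := main_lemma (pvDictC ipa2char) text.toList [] (by simp)
  rw [modifyHead_id', modifyHead_id'] at h
  rw [h]
  rfl
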